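-- pv_equiv track=rewrite | github.com/camhanson/DSCI-402-F2019 | twitter/twitter_util.py | sentiment_tuple
-- ===== SOURCE A (Python) =====
-- def standard_punct_list():
--     return ['.','?',',','-',"'",'"',';',':','/',"\t","\n",'!']
--
-- def remove_punct(char, punct):
--     if char in punct:
--         return ''
--     return char
--
-- def sentiment_tuple(codes,text,punct=standard_punct_list()):
--     text = text.lower().replace("\t", ' ').replace("\n",' ').split(" ")
--     text = ["".join([remove_punct(y,punct) for y in x]) for x in text if x != ' ']
--     total_word_count = 0
--     sentiment_word_count = 0
--     sentiment_score_sum = 0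
--     for t in text:
--         total_word_count += 1
--         if t in codes:
--             sentiment_word_count += 1
--             sentiment_score_sum += codes[t]
--     return total_word_count, sentiment_word_count, sentiment_score_sum
-- ===== SOURCE B (Python) =====
-- import collections
--
-- def standard_punct_list():
--     return ['.','?',',','-',"'",'"',';',':','/',"\t","\n",'!']
--
-- def sentiment_tuple(codes, text, punct=standard_punct_list()):
--     text = text.lower().replace("\t", ' ').replace("\n", ' ').split(" ")
--     text = ["".join([y for y in x if y not in punct]) for x in text if x != ' ']
--     counter = collections.Counter(text)
--     total_word_count = sum(counter.values())
--     sentiment_word_count = 0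
--     sentiment_score_sum = 0
--     for w, c in counter.items():
--         if w in codes:
--             sentiment_word_count += c
--             sentiment_score_sum += codes[w] * c
--     return total_word_count, sentiment_word_count, sentiment_score_sum
-- ===== Notes on version B (the rewrite author's own statement) =====
-- stated objective: alternative
-- what changed: B replaces A's per-occurrence accumulator loop by a collections.Counter frequency table: the totals are computed from one traversal of the distinct cleaned words, each weighted by its multiplicity (and the per-character remove_punct helper by a filter comprehension).
import Mathlib
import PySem

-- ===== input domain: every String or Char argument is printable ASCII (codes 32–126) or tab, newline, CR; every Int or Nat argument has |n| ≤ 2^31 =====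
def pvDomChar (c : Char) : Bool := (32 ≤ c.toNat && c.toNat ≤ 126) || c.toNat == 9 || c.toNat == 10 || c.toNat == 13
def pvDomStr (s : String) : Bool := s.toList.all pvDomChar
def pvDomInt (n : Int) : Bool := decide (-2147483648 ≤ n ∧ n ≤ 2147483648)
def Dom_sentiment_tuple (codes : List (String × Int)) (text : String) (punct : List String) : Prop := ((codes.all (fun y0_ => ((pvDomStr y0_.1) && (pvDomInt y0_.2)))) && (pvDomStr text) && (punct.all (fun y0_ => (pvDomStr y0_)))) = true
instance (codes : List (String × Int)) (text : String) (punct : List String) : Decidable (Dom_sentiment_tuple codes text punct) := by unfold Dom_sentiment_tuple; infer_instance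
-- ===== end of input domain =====

-- B replaces A's per-occurrence accumulator loop by a Counter frequency table traversed
-- once over distinct cleaned words, weighted by multiplicity (objective: alternative).

-- ===== PORT A =====
-- 'text.lower().replace("\t"," ").replace("\n"," ").split(" ")' then drop tokens == ' '
-- (these two preprocessing lines are textually identical in A and B, hence one shared helper)
def pvTokens (text : String) : List String :=
  ((PySem.Str.split? (PySem.Str.replace (PySem.Str.replace (PySem.Str.lower text) "\t" " ") "\n" " ") " ").getD []).filter
    (fun x => x != " ")

def remove_punct (char : String) (punct : List String) : String :=
  if punct.contains char then "" else char

def sentiment_tuple (codes : List (String × Int)) (text : String) (punct : List String) : Int × Int × Int :=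
  let text' := (pvTokens text).map
    (fun x => PySem.Str.join "" (x.toList.map (fun y => remove_punct (String.mk [y]) punct)))
  -- 'for t in text: total += 1; if t in codes: swc += 1; sss += codes[t]'  (codes[t] guarded by the membership test)
  text'.foldl (fun acc t =>
      (acc.1 + 1,
       if (PySem.Dict.mk codes).contains t then acc.2.1 + 1 else acc.2.1,
       if (PySem.Dict.mk codes).contains t then acc.2.2 + (PySem.Dict.mk codes).getD t 0 else acc.2.2))
    (0, 0, 0)

-- ===== PORT B =====
def sentiment_tuple_alt (codes : List (String × Int)) (text : String) (punct : List String) : Int × Int × Int :=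
  let text' := (pvTokens text).map
    (fun x => PySem.Str.join "" ((x.toList.filter (fun y => !punct.contains (String.mk [y]))).map (fun y => String.mk [y])))
  let counter := PySem.Dict.counter text'
  let total_word_count := counter.values.sum
  -- 'for w, c in counter.items(): if w in codes: swc += c; sss += codes[w] * c'
  let r := counter.items.foldl (fun acc p =>
      (if (PySem.Dict.mk codes).contains p.1 then acc.1 + p.2 else acc.1,
       if (PySem.Dict.mk codes).contains p.1 then acc.2 + (PySem.Dict.mk codes).getD p.1 0 * p.2 else acc.2))
    (0, 0)
  (total_word_count, r.1, r.2)

-- ===== PRECONDITION & SPEC =====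
def Spec_sentiment_tuple (codes : List (String × Int)) (text : String) (punct : List String) (out : Int × Int × Int) : Prop := out = sentiment_tuple_alt codes text punct
instance (codes : List (String × Int)) (text : String) (punct : List String) (out : Int × Int × Int) : Decidable (Spec_sentiment_tuple codes text punct out) := by unfold Spec_sentiment_tuple; infer_instance

-- ===== CLAIM (what is proved, stated in full; the proofs are below) =====
def Claim_equal_sentiment_tuple : Prop := ∀ (codes : List (String × Int)) (text : String) (punct : List String), Dom_sentiment_tuple codes text punct → Spec_sentiment_tuple codes text punct (sentiment_tuple codes text punct)

-- ===== LEMMAS AND PROOFS =====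

theorem pv_toList_mk (l : List Char) : (String.mk l).toList = l :=
  Eq.symm (String.ofList_eq.mp rfl)

-- joining with "" is flattening
theorem pv_join_nil_flatten (l : List (List Char)) : PySem.Chars.join [] l = l.flatten := by
  show List.intercalate [] l = l.flatten
  induction l with
  | nil => rfl
  | cons h t ih =>
    cases t with
    | nil => simp [List.intercalate]
    | cons a b =>
      simp only [List.intercalate, List.intersperse] at *
      simp_all [List.flatten]

theorem pv_flatten_ite {α : Type} (q : α → Bool) (l : List α) :
    (l.map (fun y => if q y then [y] else [])).flatten = l.filter q := by
  induction l with
  | nil => rfl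
  | cons h t ih => by_cases hq : q h <;> simp [hq, ih]

theorem pv_flatten_singletons {α : Type} (l : List α) : (l.map (fun y => [y])).flatten = l := by
  induction l with
  | nil => rfl
  | cons h t ih => simp [ih]

-- A's "".join(remove_punct per char) equals B's "".join(kept chars)
theorem pv_clean_eq (punct : List String) (x : String) :
    PySem.Str.join "" (x.toList.map (fun y => remove_punct (String.mk [y]) punct)) =
    PySem.Str.join "" ((x.toList.filter (fun y => !punct.contains (String.mk [y]))).map (fun y => String.mk [y])) := by
  apply String.toList_inj.mp
  rw [PySem.Str.toList_join, PySem.Str.toList_join]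
  show PySem.Chars.join [] _ = PySem.Chars.join [] _
  rw [pv_join_nil_flatten, pv_join_nil_flatten]
  simp only [List.map_map, Function.comp_def]
  have h1 : (x.toList.map (fun y => (remove_punct (String.mk [y]) punct).toList)) =
      x.toList.map (fun y => if (!punct.contains (String.mk [y])) then [y] else []) := by
    apply List.map_congr_left
    intro y _
    by_cases h : String.mk [y] ∈ punct <;> simp [remove_punct, h, pv_toList_mk]
  rw [h1, pv_flatten_ite]
  have h2 : ((x.toList.filter (fun y => !punct.contains (String.mk [y]))).map
      (fun y => (String.mk [y]).toList)) =
      (x.toList.filter (fun y => !punct.contains (String.mk [y]))).map (fun y => [y]) := by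
    apply List.map_congr_left; intro y _; exact pv_toList_mk [y]
  rw [h2, pv_flatten_singletons]

-- indicator sum over a nodup list containing w
theorem pv_ind_sum (f : String → Int) (w : String) (ds : List String) (hnd : ds.Nodup) (hw : w ∈ ds) :
    (ds.map (fun k => if k == w then f k else 0)).sum = f w := by
  induction ds with
  | nil => simp at hw
  | cons d t ih =>
    rcases List.mem_cons.mp hw with h | h
    · subst h
      have hnot : w ∉ t := (List.nodup_cons.mp hnd).1
      have : (t.map (fun k => if k == w then f k else 0)).sum = 0 := by
        apply List.sum_eq_zero
        intro x hx
        obtain ⟨k, hk, hkx⟩ := List.mem_map.mp hx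
        have hne : ¬ ((k == w) = true) := fun hc => hnot (eq_of_beq hc ▸ hk)
        simp [hne] at hkx; omega
      simp only [List.map_cons, List.sum_cons, beq_self_eq_true, if_true, this, add_zero]
    · have hd : ¬ ((d == w) = true) := fun hc => (List.nodup_cons.mp hnd).1 (eq_of_beq hc ▸ h)
      simp only [List.map_cons, List.sum_cons, if_neg hd]
      rw [ih (List.nodup_cons.mp hnd).2 h]
      omega

-- weighted sum over a nodup superset of the occurring words = plain sum over the word list
theorem pv_wsum_aux (f : String → Int) (ds ws : List String) (hnd : ds.Nodup)
    (hsub : ∀ w ∈ ws, w ∈ ds) :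
    (ds.map (fun k => f k * (ws.count k : Int))).sum = (ws.map f).sum := by
  induction ws with
  | nil => simp
  | cons w t ih =>
    have step : (ds.map (fun k => f k * ((w :: t).count k : Int))) =
        ds.map (fun k => f k * (t.count k : Int) + (if k == w then f k else 0)) := by
      apply List.map_congr_left
      intro k _
      have hc : ((w :: t).count k : Int) = (t.count k : Int) + (if k == w then 1 else 0) := by
        by_cases h : k = w
        · subst h; simp [List.count_cons]
        · have h2 : ¬ (w = k) := fun hh => h hh.symm
          simp [List.count_cons, h, h2]
      rw [hc]
      by_cases h : (k == w) = true <;> simp [h] <;> ring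
    rw [step, PySem.List.sum_map_add_int, ih (fun x hx => hsub x (List.mem_cons_of_mem _ hx)),
      pv_ind_sum f w ds hnd (hsub w (List.mem_cons_self))]
    simp [add_comm]

theorem pv_wsum (f : String → Int) (ws : List String) :
    ((PySem.Set.ofList ws).map (fun k => f k * (ws.count k : Int))).sum = (ws.map f).sum :=
  pv_wsum_aux f _ ws (PySem.Set.nodup_ofList ws) (fun w hw => (PySem.Set.mem_ofList ws w).mpr hw)

theorem pv_sum_filter_map {α : Type} (p : α → Bool) (f : α → Int) (l : List α) :
    ((l.filter p).map f).sum = (l.map (fun k => if p k then f k else 0)).sum := by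
  induction l with
  | nil => rfl
  | cons h t ih => by_cases hp : p h <;> simp [hp, ih]

-- the two loops agree for ANY dictionary D and ANY cleaned word list ws
theorem pv_core (D : PySem.Dict String Int) (ws : List String) :
    ws.foldl (fun acc t =>
        (acc.1 + 1,
         if D.contains t then acc.2.1 + 1 else acc.2.1,
         if D.contains t then acc.2.2 + D.getD t 0 else acc.2.2)) ((0 : Int), (0 : Int), (0 : Int)) =
      ((PySem.Dict.counter ws).values.sum,
       ((PySem.Dict.counter ws).items.foldl (fun acc p =>
          (if D.contains p.1 then acc.1 + p.2 else acc.1,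
           if D.contains p.1 then acc.2 + D.getD p.1 0 * p.2 else acc.2)) ((0 : Int), (0 : Int))).1,
       ((PySem.Dict.counter ws).items.foldl (fun acc p =>
          (if D.contains p.1 then acc.1 + p.2 else acc.1,
           if D.contains p.1 then acc.2 + D.getD p.1 0 * p.2 else acc.2)) ((0 : Int), (0 : Int))).2) := by
  rw [PySem.List.foldl_prod_mk (f := fun a (_ : String) => a + 1)
        (g := fun (b : Int × Int) t =>
          (if D.contains t then b.1 + 1 else b.1,
           if D.contains t then b.2 + D.getD t 0 else b.2)),
      PySem.List.foldl_prod_mk (f := fun a t => if D.contains t then a + 1 else a)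
        (g := fun c t => if D.contains t then c + D.getD t 0 else c),
      PySem.List.foldl_prod_mk (f := fun (a : Int) (p : String × Int) => if D.contains p.1 then a + p.2 else a)
        (g := fun (c : Int) (p : String × Int) => if D.contains p.1 then c + D.getD p.1 0 * p.2 else c)]
  refine Prod.ext ?_ (Prod.ext ?_ ?_)
  · -- total word count: length of ws vs sum of counter values
    show ws.foldl (fun a _ => a + 1) 0 = (PySem.Dict.counter ws).values.sum
    have hv : (PySem.Dict.counter ws).values = (PySem.Dict.counter ws).items.map (·.2) := rfl
    rw [hv, PySem.Dict.items_counter, List.map_map]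
    have h1 := pv_wsum (fun _ => 1) ws
    simp only [one_mul] at h1
    rw [show ((PySem.Set.ofList ws).map ((·.2) ∘ fun k => (k, (ws.count k : Int)))) =
        (PySem.Set.ofList ws).map (fun k => (ws.count k : Int)) from rfl, h1]
    rw [show (fun (a : Int) (_ : String) => a + 1) = fun a t => a + (fun _ => (1 : Int)) t from rfl,
      PySem.List.foldl_add]
    simp
  · -- sentiment word count
    show ws.foldl (fun a t => if D.contains t then a + 1 else a) 0 = _
    rw [PySem.List.foldl_if_add_one, PySem.Dict.items_counter,
      PySem.List.foldl_if_eq_foldl_filter (p := fun p => D.contains p.1)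
        (f := fun (a : Int) (p : String × Int) => a + p.2),
      PySem.List.foldl_add]
    simp only [List.filter_map, List.map_map, Function.comp_def]
    rw [pv_sum_filter_map (fun k => D.contains k) (fun k => (ws.count k : Int))]
    have h2 : ((PySem.Set.ofList ws).map (fun k => if D.contains k then (ws.count k : Int) else 0)) =
        (PySem.Set.ofList ws).map (fun k => (if D.contains k then (1 : Int) else 0) * (ws.count k : Int)) := by
      apply List.map_congr_left; intro k _; by_cases h : D.contains k <;> simp [h]
    rw [h2, pv_wsum (fun k => if D.contains k then (1 : Int) else 0) ws,
      PySem.List.sum_map_ite_one_zero (fun k => D.contains k) ws]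
  · -- sentiment score sum
    show ws.foldl (fun c t => if D.contains t then c + D.getD t 0 else c) 0 = _
    rw [PySem.List.foldl_if_eq_foldl_filter (p := fun t => D.contains t)
        (f := fun (c : Int) t => c + D.getD t 0),
      PySem.List.foldl_add, PySem.Dict.items_counter,
      PySem.List.foldl_if_eq_foldl_filter (p := fun p => D.contains p.1)
        (f := fun (c : Int) (p : String × Int) => c + D.getD p.1 0 * p.2),
      PySem.List.foldl_add]
    simp only [List.filter_map, List.map_map, Function.comp_def]
    rw [pv_sum_filter_map (fun k => D.contains k) (fun k => D.getD k 0 * (ws.count k : Int)),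
      pv_sum_filter_map (fun k => D.contains k) (fun k => D.getD k 0)]
    have h3 : ((PySem.Set.ofList ws).map (fun k => if D.contains k then D.getD k 0 * (ws.count k : Int) else 0)) =
        (PySem.Set.ofList ws).map (fun k => (if D.contains k then D.getD k 0 else 0) * (ws.count k : Int)) := by
      apply List.map_congr_left; intro k _; by_cases h : D.contains k <;> simp [h]
    rw [h3, pv_wsum (fun k => if D.contains k then D.getD k 0 else 0) ws]

-- ===== VERDICT (by name: the statement is the Claim_ definition above) =====
set_option maxHeartbeats 4000000 in
theorem sentiment_tuple_spec : Claim_equal_sentiment_tuple := by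
  intro codes text punct _
  unfold Spec_sentiment_tuple sentiment_tuple sentiment_tuple_alt
  simp only [pv_clean_eq]
  exact pv_core _ _
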